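-- pv_equiv track=rewrite | github.com/Amarantosy1/Python-learning | python/pta/pta_b_3_updated.py | find_extreme
-- ===== SOURCE A (Python) =====
-- def find_extreme(lst, find_max=True):
--     extreme_value = lst[0]
--     extreme_index = 0
--     for index, value in enumerate(lst):
--         if (find_max and value > extreme_value) or (not find_max and value < extreme_value):
--             extreme_value = value
--             extreme_index = index
--     return [extreme_index, extreme_value]
-- ===== SOURCE B (Python) =====
-- def find_extreme(lst, find_max=True):
--     v = max(lst) if find_max else min(lst)
--     return [lst.index(v), v]
-- ===== Notes on version B (the rewrite author's own statement) =====
-- stated objective: idiomatic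
-- what changed: Replaces A's single fused enumerate loop tracking (index,value) with two built-in passes: compute max(lst)/min(lst), then lst.index of it (first occurrence preserves A's tie-breaking).
import Mathlib
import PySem

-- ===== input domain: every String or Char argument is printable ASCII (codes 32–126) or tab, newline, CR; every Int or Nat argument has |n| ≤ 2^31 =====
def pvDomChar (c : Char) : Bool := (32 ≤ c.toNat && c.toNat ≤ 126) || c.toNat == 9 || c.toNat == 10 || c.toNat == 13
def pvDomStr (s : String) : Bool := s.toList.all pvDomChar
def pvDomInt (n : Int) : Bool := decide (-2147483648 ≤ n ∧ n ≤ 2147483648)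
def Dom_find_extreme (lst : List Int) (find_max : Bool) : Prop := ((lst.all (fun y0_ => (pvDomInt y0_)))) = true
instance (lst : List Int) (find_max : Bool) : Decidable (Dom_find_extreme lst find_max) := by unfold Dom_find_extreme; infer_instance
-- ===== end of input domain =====

-- B replaces A's fused tracking loop by two built-in passes (max/min, then first index); same O(n), more idiomatic.

-- ===== PORT A =====
-- one loop step of A's 'for index, value in enumerate(lst)'
def feStep (find_max : Bool) (st : Int × Int) (p : Int × Int) : Int × Int :=
  if (find_max && decide (p.2 > st.2)) || (!find_max && decide (p.2 < st.2)) then (p.1, p.2) else st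

def find_extreme (lst : List Int) (find_max : Bool) : List Int :=
  match PySem.List.pyGet? lst 0 with
  | none => []   -- lst[0] raises IndexError on []; excluded by Pre_
  | some ev0 =>
    let r := (PySem.List.enumerate lst 0).foldl (feStep find_max) (0, ev0)
    [r.1, r.2]

-- ===== PORT B =====
def find_extreme_alt (lst : List Int) (find_max : Bool) : List Int :=
  match (if find_max then PySem.List.max? lst (fun y => y) else PySem.List.min? lst (fun y => y)) with
  | none => []   -- max/min of [] raises ValueError; excluded by Pre_
  | some v =>
    match PySem.List.index? lst v with
    | none => []  -- lst.index cannot fail: v ∈ lst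
    | some i => [(i : Int), v]

-- ===== PRECONDITION & SPEC =====
-- Pre_ excludes only the empty list, on which A raises IndexError (and B raises ValueError).
def Pre_find_extreme (lst : List Int) (find_max : Bool) : Prop := lst ≠ []
instance (lst : List Int) (find_max : Bool) : Decidable (Pre_find_extreme lst find_max) := by unfold Pre_find_extreme; infer_instance
def pvWitness_find_extreme : List Int × Bool := ([3, 1, 4, 1, 5], true)

def Spec_find_extreme (lst : List Int) (find_max : Bool) (out : List Int) : Prop := out = find_extreme_alt lst find_max
instance (lst : List Int) (find_max : Bool) (out : List Int) : Decidable (Spec_find_extreme lst find_max out) := by unfold Spec_find_extreme; infer_instance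

-- ===== CLAIM (what is proved, stated in full; the proofs are below) =====
def Claim_equal_find_extreme : Prop := ∀ (lst : List Int) (find_max : Bool), Dom_find_extreme lst find_max → Pre_find_extreme lst find_max → Spec_find_extreme lst find_max (find_extreme lst find_max)

-- ===== LEMMAS AND PROOFS =====

-- Invariant of A's loop, max case: the value is the running max, and the index is the
-- position of its first occurrence in the remaining list (offset by the enumerate start).
lemma fe_loop_max (rest : List Int) : ∀ (s ei ev : Int),
    (((PySem.List.enumerate rest s).foldl (feStep true) (ei, ev)).2
        = rest.foldl max ev)
    ∧ (((PySem.List.enumerate rest s).foldl (feStep true) (ei, ev)).2 = ev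
        → (PySem.List.enumerate rest s).foldl (feStep true) (ei, ev) = (ei, ev))
    ∧ (((PySem.List.enumerate rest s).foldl (feStep true) (ei, ev)).2 ≠ ev
        → ∃ k : Nat, PySem.List.index? rest (((PySem.List.enumerate rest s).foldl (feStep true) (ei, ev)).2) = some k
            ∧ ((PySem.List.enumerate rest s).foldl (feStep true) (ei, ev)).1 = s + k) := by
  induction rest with
  | nil => intro s ei ev; simp [PySem.List.enumerate_nil]
  | cons v r ih =>
    intro s ei ev
    rw [PySem.List.enumerate_cons]
    simp only [List.foldl_cons]
    by_cases h : v > ev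
    · have hstep : feStep true (ei, ev) (s, v) = (s, v) := by
        simp [feStep, h]
      rw [hstep]
      obtain ⟨ih1, ih2, ih3⟩ := ih (s+1) s v
      have hge : v ≤ r.foldl max v := (PySem.List.le_foldl_max r v).1
      refine ⟨by rw [ih1]; rw [show max ev v = v from by omega] at *; , ?_, ?_⟩
      · intro hq; exfalso; rw [ih1] at hq; omega
      · intro _
        by_cases hv : ((PySem.List.enumerate r (s+1)).foldl (feStep true) (s, v)).2 = v
        · rw [ih2 hv]
          exact ⟨0, PySem.List.index?_cons_self v r, by omega⟩
        · obtain ⟨k, hk1, hk2⟩ := ih3 hv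
          refine ⟨k + 1, ?_, by omega⟩
          rw [PySem.List.index?_cons_of_ne r (by intro hh; exact hv hh.symm), hk1]
          rfl
    · have hstep : feStep true (ei, ev) (s, v) = (ei, ev) := by
        simp [feStep, h]
      rw [hstep]
      obtain ⟨ih1, ih2, ih3⟩ := ih (s+1) ei ev
      have hge : ev ≤ r.foldl max ev := (PySem.List.le_foldl_max r ev).1
      refine ⟨by rw [ih1, show max ev v = ev from by omega], ih2, ?_⟩
      · intro hne
        obtain ⟨k, hk1, hk2⟩ := ih3 hne
        refine ⟨k + 1, ?_, by omega⟩
        have hvne : v ≠ ((PySem.List.enumerate r (s+1)).foldl (feStep true) (ei, ev)).2 := by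
          rw [ih1] at hne ⊢; omega
        rw [PySem.List.index?_cons_of_ne r hvne, hk1]
        rfl

-- Invariant of A's loop, min case (mirror of fe_loop_max).
lemma fe_loop_min (rest : List Int) : ∀ (s ei ev : Int),
    (((PySem.List.enumerate rest s).foldl (feStep false) (ei, ev)).2
        = rest.foldl min ev)
    ∧ (((PySem.List.enumerate rest s).foldl (feStep false) (ei, ev)).2 = ev
        → (PySem.List.enumerate rest s).foldl (feStep false) (ei, ev) = (ei, ev))
    ∧ (((PySem.List.enumerate rest s).foldl (feStep false) (ei, ev)).2 ≠ ev
        → ∃ k : Nat, PySem.List.index? rest (((PySem.List.enumerate rest s).foldl (feStep false) (ei, ev)).2) = some k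
            ∧ ((PySem.List.enumerate rest s).foldl (feStep false) (ei, ev)).1 = s + k) := by
  induction rest with
  | nil => intro s ei ev; simp [PySem.List.enumerate_nil]
  | cons v r ih =>
    intro s ei ev
    rw [PySem.List.enumerate_cons]
    simp only [List.foldl_cons]
    by_cases h : v < ev
    · have hstep : feStep false (ei, ev) (s, v) = (s, v) := by
        simp [feStep, h]
      rw [hstep]
      obtain ⟨ih1, ih2, ih3⟩ := ih (s+1) s v
      have hge : r.foldl min v ≤ v := (PySem.List.foldl_min_le r v).1
      refine ⟨by rw [ih1]; rw [show min ev v = v from by omega] at *; , ?_, ?_⟩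
      · intro hq; exfalso; rw [ih1] at hq; omega
      · intro _
        by_cases hv : ((PySem.List.enumerate r (s+1)).foldl (feStep false) (s, v)).2 = v
        · rw [ih2 hv]
          exact ⟨0, PySem.List.index?_cons_self v r, by omega⟩
        · obtain ⟨k, hk1, hk2⟩ := ih3 hv
          refine ⟨k + 1, ?_, by omega⟩
          rw [PySem.List.index?_cons_of_ne r (by intro hh; exact hv hh.symm), hk1]
          rfl
    · have hstep : feStep false (ei, ev) (s, v) = (ei, ev) := by
        simp [feStep, h]
      rw [hstep]
      obtain ⟨ih1, ih2, ih3⟩ := ih (s+1) ei ev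
      have hge : r.foldl min ev ≤ ev := (PySem.List.foldl_min_le r ev).1
      refine ⟨by rw [ih1, show min ev v = ev from by omega], ih2, ?_⟩
      · intro hne
        obtain ⟨k, hk1, hk2⟩ := ih3 hne
        refine ⟨k + 1, ?_, by omega⟩
        have hvne : v ≠ ((PySem.List.enumerate r (s+1)).foldl (feStep false) (ei, ev)).2 := by
          rw [ih1] at hne ⊢; omega
        rw [PySem.List.index?_cons_of_ne r hvne, hk1]
        rfl

-- ===== VERDICT (by name: the statement is the Claim_ definition above) =====
theorem find_extreme_spec : Claim_equal_find_extreme := by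
  intro lst find_max _ hpre
  unfold Spec_find_extreme
  obtain ⟨x, t, rfl⟩ : ∃ x t, lst = x :: t := by
    cases lst with
    | nil => exact absurd rfl hpre
    | cons a b => exact ⟨a, b, rfl⟩
  have hget : PySem.List.pyGet? (x :: t) 0 = some x := by
    simp [PySem.List.pyGet?, PySem.List.pyIdx?]
  cases find_max with
  | true =>
    simp only [find_extreme, find_extreme_alt, hget, if_true, PySem.List.max?_id_cons,
      PySem.List.enumerate_cons, List.foldl_cons]
    have hstep : feStep true ((0 : Int), x) (0, x) = (0, x) := by simp [feStep]
    rw [hstep]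
    simp only [zero_add]
    obtain ⟨h1, h2, h3⟩ := fe_loop_max t 1 0 x
    have hge : x ≤ t.foldl max x := (PySem.List.le_foldl_max t x).1
    by_cases hM : ((PySem.List.enumerate t 1).foldl (feStep true) ((0 : Int), x)).2 = x
    · rw [h2 hM]
      rw [h1] at hM
      rw [hM, PySem.List.index?_cons_self]
      simp
    · obtain ⟨k, hk1, hk2⟩ := h3 hM
      rw [h1] at hM hk1
      rw [hk2, h1]
      rw [PySem.List.index?_cons_of_ne t (by intro hh; exact hM hh.symm), hk1]
      simp only [Option.map_some]
      simp
      omega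
  | false =>
    simp only [find_extreme, find_extreme_alt, hget, Bool.false_eq_true, if_false, PySem.List.min?_id_cons,
      PySem.List.enumerate_cons, List.foldl_cons]
    have hstep : feStep false ((0 : Int), x) (0, x) = (0, x) := by simp [feStep]
    rw [hstep]
    simp only [zero_add]
    obtain ⟨h1, h2, h3⟩ := fe_loop_min t 1 0 x
    have hge : t.foldl min x ≤ x := (PySem.List.foldl_min_le t x).1
    by_cases hM : ((PySem.List.enumerate t 1).foldl (feStep false) ((0 : Int), x)).2 = x
    · rw [h2 hM]
      rw [h1] at hM
      rw [hM, PySem.List.index?_cons_self]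
      simp
    · obtain ⟨k, hk1, hk2⟩ := h3 hM
      rw [h1] at hM hk1
      rw [hk2, h1]
      rw [PySem.List.index?_cons_of_ne t (by intro hh; exact hM hh.symm), hk1]
      simp only [Option.map_some]
      simp
      omega
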